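-- pv_equiv track=rewrite | github.com/conegiorno/StanowiskoChwytak | scripts/pyhton_scripts/force_sensor_data.py | findMCU
-- ===== SOURCE A (Python) =====
-- def findMCU(ports, mcu_name):
--
--     usb_port = 'None'
--
--     for i in range(0,len(ports)):
--         port = ports[i]
--         str_port = str(port)
--
--         if mcu_name in str_port:
--             split_port = str_port.split(' ')
--             usb_port = (split_port[0])
--
--     return usb_port
-- ===== SOURCE B (Python) =====
-- def findMCU(ports, mcu_name):
--     for port in reversed(ports):
--         str_port = str(port)
--         if mcu_name in str_port:
--             return str_port.split(' ')[0]
--     return 'None'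
-- ===== Notes on version B (the rewrite author's own statement) =====
-- stated objective: idiomatic
-- what changed: Replaces A's full forward sweep that overwrites a last-writer-wins accumulator with a reverse scan that returns the first match immediately (early termination), no accumulator.
import Mathlib
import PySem

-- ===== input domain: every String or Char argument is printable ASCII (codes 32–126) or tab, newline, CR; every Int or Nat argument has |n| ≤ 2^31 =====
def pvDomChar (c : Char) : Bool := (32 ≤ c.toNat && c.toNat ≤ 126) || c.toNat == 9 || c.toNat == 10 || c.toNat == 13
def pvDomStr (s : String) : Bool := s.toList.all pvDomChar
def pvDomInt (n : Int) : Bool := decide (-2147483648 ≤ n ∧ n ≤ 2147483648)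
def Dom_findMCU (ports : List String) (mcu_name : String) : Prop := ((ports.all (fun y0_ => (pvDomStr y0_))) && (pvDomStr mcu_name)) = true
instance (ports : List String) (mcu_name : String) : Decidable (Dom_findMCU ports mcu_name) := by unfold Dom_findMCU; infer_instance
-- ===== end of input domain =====

-- B replaces A's full forward sweep with a last-writer-wins accumulator by a reverse scan
-- returning the first match immediately (idiomatic early termination); same return values.

-- str_port.split(' ')[0]; ' ' ≠ '' so split never fails and the result is nonempty, so [0] is headD
def pvTok (s : String) : String := ((PySem.Str.split? s " ").getD []).headD ""

-- ===== PORT A =====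
-- A iterates ports front to back, overwriting usb_port (initial 'None') on every match
def findMCU (ports : List String) (mcu_name : String) : String :=
  ports.foldl (fun usb_port str_port =>
    if PySem.Str.isIn mcu_name str_port then pvTok str_port else usb_port) "None"

-- ===== PORT B =====
-- B scans ports.reverse and returns on the FIRST match; 'None' if the scan finishes
def pvScanRev (mcu_name : String) : List String → String
  | [] => "None"
  | str_port :: rest =>
      if PySem.Str.isIn mcu_name str_port then pvTok str_port else pvScanRev mcu_name rest

def findMCU_alt (ports : List String) (mcu_name : String) : String :=
  pvScanRev mcu_name ports.reverse

-- ===== PRECONDITION & SPEC =====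
def Spec_findMCU (ports : List String) (mcu_name : String) (out : String) : Prop := out = findMCU_alt ports mcu_name
instance (ports : List String) (mcu_name : String) (out : String) : Decidable (Spec_findMCU ports mcu_name out) := by unfold Spec_findMCU; infer_instance

-- ===== CLAIM (what is proved, stated in full; the proofs are below) =====
def Claim_equal_findMCU : Prop := ∀ (ports : List String) (mcu_name : String), Dom_findMCU ports mcu_name → Spec_findMCU ports mcu_name (findMCU ports mcu_name)

-- ===== LEMMAS AND PROOFS =====

-- a generalised-base version of pvScanRev, to carry A's accumulator
def pvScanRevAcc (mcu_name : String) (acc : String) : List String → String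
  | [] => acc
  | p :: rest =>
      if PySem.Str.isIn mcu_name p then pvTok p else pvScanRevAcc mcu_name acc rest

theorem pvScanRevAcc_none (m : String) (l : List String) :
    pvScanRevAcc m "None" l = pvScanRev m l := by
  induction l with
  | nil => rfl
  | cons p rest ih => simp [pvScanRevAcc, pvScanRev, ih]

theorem pvScanRevAcc_append_single (m acc p : String) (l : List String) :
    pvScanRevAcc m acc (l ++ [p]) =
      pvScanRevAcc m (if PySem.Str.isIn m p then pvTok p else acc) l := by
  induction l with
  | nil => rfl
  | cons q rest ih => simp [pvScanRevAcc, ih]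

theorem pvFoldl_eq_scanRevAcc (m acc : String) (l : List String) :
    l.foldl (fun u p => if PySem.Str.isIn m p then pvTok p else u) acc =
      pvScanRevAcc m acc l.reverse := by
  induction l generalizing acc with
  | nil => rfl
  | cons p rest ih =>
      simp only [List.foldl_cons, List.reverse_cons, pvScanRevAcc_append_single, ih]

-- ===== VERDICT (by name: the statement is the Claim_ definition above) =====
theorem findMCU_spec : Claim_equal_findMCU := by
  intro ports mcu_name _
  unfold Spec_findMCU findMCU findMCU_alt
  rw [pvFoldl_eq_scanRevAcc, pvScanRevAcc_none]
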